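-- pv_equiv track=rewrite | github.com/ShutingSunSS/CIT5_Squarelotrons_Python | Squarelotrons.py | inverse_diagonal_flip
-- ===== SOURCE A (Python) =====
-- from copy import deepcopy
--
-- def inverse_diagonal_flip(squarelotron, ring):
--     """Performs the Main Inverse Diagonal of the squarelotron."""
--     """i_d_s[row][column] -> i_d_s[4 - column][4 - row]"""
--     i_d_s = deepcopy(squarelotron)
--     if (ring == 'outer'):
--         for column in range(4):
--             i_d_s[0][column], i_d_s[4 - column][4] = i_d_s[4 - column][4], i_d_s[0][column]
--         for row in range(1, 4):
--             i_d_s[row][0], i_d_s[4][4 - row] = i_d_s[4][4 - row], i_d_s[row][0]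
--     if (ring == 'inner'):
--         for column in range(1,3):
--             i_d_s[1][column], i_d_s[4 - column][3] = i_d_s[4 - column][3], i_d_s[1][column]
--         i_d_s[2][1], i_d_s[3][2] = i_d_s[3][2], i_d_s[2][1]
--     return i_d_s
-- ===== SOURCE B (Python) =====
-- from copy import deepcopy
--
-- def inverse_diagonal_flip(squarelotron, ring):
--     """Anti-diagonal flip of the requested ring: every ring cell (r, c) takes
--     the value of the original cell (4 - c, 4 - r), read from the untouched input."""
--     result = deepcopy(squarelotron)
--     if ring == 'outer':
--         cells = [(0, c) for c in range(5)] + [(4, c) for c in range(5)] \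
--               + [(r, 0) for r in range(1, 4)] + [(r, 4) for r in range(1, 4)]
--     elif ring == 'inner':
--         cells = [(r, c) for r in range(1, 4) for c in range(1, 4)]
--     else:
--         return result
--     for r, c in cells:
--         result[r][c] = squarelotron[4 - c][4 - r]
--     return result
-- ===== Notes on version B (the rewrite author's own statement) =====
-- stated objective: simpler
-- what changed: B replaces A's hand-picked sequence of pairwise in-place swaps by building the list of ring cells once and assigning each cell (r,c) the value of the untouched original at (4-c,4-r), so the anti-diagonal reflection is applied uniformly instead of via seven ad-hoc swap statements.
import Mathlib
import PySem

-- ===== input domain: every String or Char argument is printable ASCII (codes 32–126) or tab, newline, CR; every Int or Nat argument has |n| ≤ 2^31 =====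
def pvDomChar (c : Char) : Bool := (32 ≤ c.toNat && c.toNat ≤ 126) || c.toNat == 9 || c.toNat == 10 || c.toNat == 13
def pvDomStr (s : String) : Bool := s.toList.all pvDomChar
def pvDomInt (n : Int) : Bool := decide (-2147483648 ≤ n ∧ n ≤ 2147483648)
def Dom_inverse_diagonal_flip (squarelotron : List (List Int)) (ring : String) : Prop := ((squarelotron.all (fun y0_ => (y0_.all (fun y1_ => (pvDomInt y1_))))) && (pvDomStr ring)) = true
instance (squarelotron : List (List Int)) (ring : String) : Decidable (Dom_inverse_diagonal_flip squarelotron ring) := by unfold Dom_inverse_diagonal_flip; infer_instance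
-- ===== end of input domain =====

-- B applies the anti-diagonal reflection uniformly: it lists the ring's cells once and assigns
-- each cell (r, c) the original value at (4-c, 4-r), instead of A's seven hand-picked pairwise swaps.

-- ===== PORT A =====
-- g[r][c] read; all indices that occur are the nonnegative literals 0..4 (in-range under Pre_)
def pvCellGet (g : List (List Int)) (r c : Int) : Int :=
  PySem.List.pyGetD (PySem.List.pyGetD g r []) c 0
-- g[r][c] = v; indices are nonnegative literals, so .toNat is exact here
def pvCellSet (g : List (List Int)) (r c : Int) (v : Int) : List (List Int) :=
  g.modify r.toNat (fun row => row.modify c.toNat (fun _ => v))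
-- the Python simultaneous swap 'g[r1][c1], g[r2][c2] = g[r2][c2], g[r1][c1]':
-- both right-hand values are read first, then the two cells are written left to right
def pvSwap (g : List (List Int)) (r1 c1 r2 c2 : Int) : List (List Int) :=
  let x := pvCellGet g r2 c2
  let y := pvCellGet g r1 c1
  pvCellSet (pvCellSet g r1 c1 x) r2 c2 y

def inverse_diagonal_flip (squarelotron : List (List Int)) (ring : String) : List (List Int) :=
  let ids := squarelotron  -- deepcopy: lists are immutable values here
  let ids := if ring = "outer" then
      let ids := (PySem.List.pyRange 0 4 1).foldl (fun g column => pvSwap g 0 column (4 - column) 4) ids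
      (PySem.List.pyRange 1 4 1).foldl (fun g row => pvSwap g row 0 4 (4 - row)) ids
    else ids
  if ring = "inner" then
    let ids2 := (PySem.List.pyRange 1 3 1).foldl (fun g column => pvSwap g 1 column (4 - column) 3) ids
    pvSwap ids2 2 1 3 2
  else ids

-- ===== PORT B =====
def pvOuterCells : List (Int × Int) :=
  ((PySem.List.pyRange 0 5 1).map (fun c => ((0 : Int), c))) ++
  ((PySem.List.pyRange 0 5 1).map (fun c => ((4 : Int), c))) ++
  ((PySem.List.pyRange 1 4 1).map (fun r => (r, (0 : Int)))) ++
  ((PySem.List.pyRange 1 4 1).map (fun r => (r, (4 : Int))))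
def pvInnerCells : List (Int × Int) :=
  (PySem.List.pyRange 1 4 1).flatMap (fun r => (PySem.List.pyRange 1 4 1).map (fun c => (r, c)))

def inverse_diagonal_flip_alt (squarelotron : List (List Int)) (ring : String) : List (List Int) :=
  let result := squarelotron  -- deepcopy: lists are immutable values here
  if ring = "outer" then
    pvOuterCells.foldl (fun g p => pvCellSet g p.1 p.2 (pvCellGet squarelotron (4 - p.2) (4 - p.1))) result
  else if ring = "inner" then
    pvInnerCells.foldl (fun g p => pvCellSet g p.1 p.2 (pvCellGet squarelotron (4 - p.2) (4 - p.1))) result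
  else result

-- ===== PRECONDITION & SPEC =====
-- Pre_ excludes ragged grids on which a requested flip ring is only partially present: there A either
-- raises IndexError or silently flips a partial ring (e.g. 'outer' with row 0 of length 4), and B's
-- uniform per-cell assignment raises IndexError on every such grid A still returns on.
def Pre_inverse_diagonal_flip (squarelotron : List (List Int)) (ring : String) : Prop :=
  (ring = "outer" → 5 ≤ squarelotron.length ∧ ∀ i < 5, 5 ≤ (squarelotron.getD i []).length) ∧
  (ring = "inner" → 4 ≤ squarelotron.length ∧ ∀ i < 4, 1 ≤ i → 4 ≤ (squarelotron.getD i []).length)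
instance (squarelotron : List (List Int)) (ring : String) : Decidable (Pre_inverse_diagonal_flip squarelotron ring) := by
  unfold Pre_inverse_diagonal_flip; infer_instance

def pvWitness_inverse_diagonal_flip : List (List Int) × String :=
  ([[1,2,3,4,5],[6,7,8,9,10],[11,12,13,14,15],[16,17,18,19,20],[21,22,23,24,25]], "outer")

def Spec_inverse_diagonal_flip (squarelotron : List (List Int)) (ring : String) (out : List (List Int)) : Prop := out = inverse_diagonal_flip_alt squarelotron ring
instance (squarelotron : List (List Int)) (ring : String) (out : List (List Int)) : Decidable (Spec_inverse_diagonal_flip squarelotron ring out) := by unfold Spec_inverse_diagonal_flip; infer_instance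

-- ===== CLAIM (what is proved, stated in full; the proofs are below) =====
def Claim_equal_inverse_diagonal_flip : Prop := ∀ (squarelotron : List (List Int)) (ring : String), Dom_inverse_diagonal_flip squarelotron ring → Pre_inverse_diagonal_flip squarelotron ring → Spec_inverse_diagonal_flip squarelotron ring (inverse_diagonal_flip squarelotron ring)

-- ===== LEMMAS AND PROOFS =====

theorem pvEx5 {α : Type} (l : List α) (h : 5 ≤ l.length) :
    ∃ a b c d e t, l = a :: b :: c :: d :: e :: t := by
  match l, h with
  | a :: b :: c :: d :: e :: t, _ => exact ⟨a, b, c, d, e, t, rfl⟩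

theorem pvEx4 {α : Type} (l : List α) (h : 4 ≤ l.length) :
    ∃ a b c d t, l = a :: b :: c :: d :: t := by
  match l, h with
  | a :: b :: c :: d :: t, _ => exact ⟨a, b, c, d, t, rfl⟩

theorem pvRow1 {α : Type} (x0 x1 x2 x3 x4 : α) (t : List α) (d : α) :
    PySem.List.pyGetD (x0::x1::x2::x3::x4::t) (1:Int) d = x1 := by
  simp [PySem.List.pyGetD, PySem.List.pyGet?, PySem.List.pyIdx?]
  try rw [if_pos (by omega)]
  try rfl

theorem pvRow2 {α : Type} (x0 x1 x2 x3 x4 : α) (t : List α) (d : α) :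
    PySem.List.pyGetD (x0::x1::x2::x3::x4::t) (2:Int) d = x2 := by
  simp [PySem.List.pyGetD, PySem.List.pyGet?, PySem.List.pyIdx?]
  try rw [if_pos (by omega)]
  try rfl

theorem pvRow3 {α : Type} (x0 x1 x2 x3 x4 : α) (t : List α) (d : α) :
    PySem.List.pyGetD (x0::x1::x2::x3::x4::t) (3:Int) d = x3 := by
  simp [PySem.List.pyGetD, PySem.List.pyGet?, PySem.List.pyIdx?]
  try rw [if_pos (by omega)]
  try rfl

theorem pvRow4 {α : Type} (x0 x1 x2 x3 x4 : α) (t : List α) (d : α) :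
    PySem.List.pyGetD (x0::x1::x2::x3::x4::t) (4:Int) d = x4 := by
  simp [PySem.List.pyGetD, PySem.List.pyGet?, PySem.List.pyIdx?]
  try rw [if_pos (by omega)]
  try rfl

theorem pvQ1 {α : Type} (x0 x1 x2 x3 : α) (t : List α) (d : α) :
    PySem.List.pyGetD (x0::x1::x2::x3::t) (1:Int) d = x1 := by
  simp [PySem.List.pyGetD, PySem.List.pyGet?, PySem.List.pyIdx?]
  try rw [if_pos (by omega)]
  try rfl

theorem pvQ2 {α : Type} (x0 x1 x2 x3 : α) (t : List α) (d : α) :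
    PySem.List.pyGetD (x0::x1::x2::x3::t) (2:Int) d = x2 := by
  simp [PySem.List.pyGetD, PySem.List.pyGet?, PySem.List.pyIdx?]
  try rw [if_pos (by omega)]
  try rfl

theorem pvQ3 {α : Type} (x0 x1 x2 x3 : α) (t : List α) (d : α) :
    PySem.List.pyGetD (x0::x1::x2::x3::t) (3:Int) d = x3 := by
  simp [PySem.List.pyGetD, PySem.List.pyGet?, PySem.List.pyIdx?]
  try rw [if_pos (by omega)]
  try rfl

theorem pvr04 : PySem.List.pyRange 0 4 1 = [0, 1, 2, 3] := by decide
theorem pvr14 : PySem.List.pyRange 1 4 1 = [1, 2, 3] := by decide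
theorem pvr13 : PySem.List.pyRange 1 3 1 = [1, 2] := by decide
theorem pvOuterCells_eq : pvOuterCells =
    [(0,0),(0,1),(0,2),(0,3),(0,4),(4,0),(4,1),(4,2),(4,3),(4,4),(1,0),(2,0),(3,0),(1,4),(2,4),(3,4)] := by decide
theorem pvInnerCells_eq : pvInnerCells =
    [(1,1),(1,2),(1,3),(2,1),(2,2),(2,3),(3,1),(3,2),(3,3)] := by decide

-- ===== VERDICT (by name: the statement is the Claim_ definition above) =====
set_option maxHeartbeats 4000000 in
theorem inverse_diagonal_flip_spec : Claim_equal_inverse_diagonal_flip := by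
  intro s ring _ hpre
  unfold Spec_inverse_diagonal_flip
  obtain ⟨ho, hi⟩ := hpre
  by_cases h1 : ring = "outer"
  · subst h1
    obtain ⟨hlen, hrows⟩ := ho rfl
    obtain ⟨r0, r1, r2, r3, r4, t, rfl⟩ := pvEx5 s hlen
    obtain ⟨a0,a1,a2,a3,a4,t0,rfl⟩ := pvEx5 r0 (by simpa using hrows 0 (by omega))
    obtain ⟨b0,b1,b2,b3,b4,t1,rfl⟩ := pvEx5 r1 (by simpa using hrows 1 (by omega))
    obtain ⟨c0,c1,c2,c3,c4,t2,rfl⟩ := pvEx5 r2 (by simpa using hrows 2 (by omega))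
    obtain ⟨d0,d1,d2,d3,d4,t3,rfl⟩ := pvEx5 r3 (by simpa using hrows 3 (by omega))
    obtain ⟨e0,e1,e2,e3,e4,t4,rfl⟩ := pvEx5 r4 (by simpa using hrows 4 (by omega))
    simp only [inverse_diagonal_flip, inverse_diagonal_flip_alt, pvr04, pvr14, pvOuterCells_eq]
    simp [pvSwap, pvCellGet, pvCellSet, Int.reduceToNat,
      pvRow1, pvRow2, pvRow3, pvRow4]
  · by_cases h2 : ring = "inner"
    · subst h2
      obtain ⟨hlen, hrows⟩ := hi rfl
      obtain ⟨r0, r1, r2, r3, t, rfl⟩ := pvEx4 s hlen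
      obtain ⟨b0,b1,b2,b3,t1,rfl⟩ := pvEx4 r1 (by simpa using hrows 1 (by omega) (by omega))
      obtain ⟨c0,c1,c2,c3,t2,rfl⟩ := pvEx4 r2 (by simpa using hrows 2 (by omega) (by omega))
      obtain ⟨d0,d1,d2,d3,t3,rfl⟩ := pvEx4 r3 (by simpa using hrows 3 (by omega) (by omega))
      simp only [inverse_diagonal_flip, inverse_diagonal_flip_alt, pvr13, pvr14, pvInnerCells_eq]
      simp [h1, pvSwap, pvCellGet, pvCellSet, Int.reduceToNat,
        pvQ1, pvQ2, pvQ3]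
    · simp [inverse_diagonal_flip, inverse_diagonal_flip_alt, h1, h2]
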